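-- pv_equiv track=rewrite | github.com/TencentBlueKing/bk-log | apps/log_search/handlers/search/mapping_handlers.py | _get_text_fields
-- ===== SOURCE A (Python) =====
-- def _get_text_fields(final_fields_list: list):
--     """获取text类型字段"""
--     final_field_name_list = [field["field_name"] for field in final_fields_list]
--     if "log" in final_field_name_list:
--         return ["log"]
--     type_text_fields = [
--         field["field_name"]
--         for field in final_fields_list
--         if field["field_type"] == "text" and not field["field_name"].startswith("_")
--     ]
--     if type_text_fields:
--         return type_text_fields[:2]
--     type_keyword_fields = [
--         field["field_name"]
--         for field in final_fields_list
--         if field["field_type"] == "keyword" and not field["field_name"].startswith("_")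
--     ]
--     return type_keyword_fields[:2]
-- ===== SOURCE B (Python) =====
-- def _get_text_fields(final_fields_list: list):
--     """Rank-based selection: one pass collects (rank, name) candidates (rank 0 = text,
--     rank 1 = keyword); return the names of the minimal rank, truncated to two."""
--     if any(field["field_name"] == "log" for field in final_fields_list):
--         return ["log"]
--     ranked = [
--         (0 if field["field_type"] == "text" else 1, field["field_name"])
--         for field in final_fields_list
--         if field["field_type"] in ("text", "keyword") and not field["field_name"].startswith("_")
--     ]
--     if not ranked:
--         return []
--     best = min(rank for rank, _ in ranked)
--     return [name for rank, name in ranked if rank == best][:2]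
-- ===== Notes on version B (the rewrite author's own statement) =====
-- stated objective: alternative
-- what changed: Replaces A's staged text-then-keyword filtering (two comprehensions tried in order) by a rank-based selection: one comprehension collects (rank, name) candidates with rank 0 for text and 1 for keyword, then the names of the minimal rank are returned, truncated to two.
import Mathlib
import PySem

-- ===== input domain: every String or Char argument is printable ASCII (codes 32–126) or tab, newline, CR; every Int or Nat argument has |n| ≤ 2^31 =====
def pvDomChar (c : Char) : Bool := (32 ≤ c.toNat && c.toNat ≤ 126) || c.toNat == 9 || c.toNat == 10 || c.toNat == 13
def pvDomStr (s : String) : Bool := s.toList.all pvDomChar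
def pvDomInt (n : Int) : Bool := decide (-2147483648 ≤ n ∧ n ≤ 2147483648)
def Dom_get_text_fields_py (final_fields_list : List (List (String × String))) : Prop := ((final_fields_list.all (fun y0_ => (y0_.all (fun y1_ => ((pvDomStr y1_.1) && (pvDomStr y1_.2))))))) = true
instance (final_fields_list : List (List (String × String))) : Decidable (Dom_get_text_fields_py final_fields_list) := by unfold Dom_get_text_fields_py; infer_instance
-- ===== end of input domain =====

-- B replaces A's staged text-then-keyword filtering by a single rank-based selection
-- (collect (rank, name) candidates, return the minimal rank's names) — alternative decomposition, same cost.

-- shared helpers: field["field_name"] / field["field_type"]; the `.getD ""` default is only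
-- reached outside Pre_get_text_fields_py (where the Python raises KeyError)
def pvName (f : List (String × String)) : String := ((PySem.Dict.mk f).get? "field_name").getD ""
def pvType (f : List (String × String)) : String := ((PySem.Dict.mk f).get? "field_type").getD ""

-- ===== PORT A =====
def get_text_fields_py (final_fields_list : List (List (String × String))) : List String :=
  let final_field_name_list := final_fields_list.map (fun f => pvName f)
  if final_field_name_list.contains "log" then ["log"]
  else
    let type_text_fields :=
      (final_fields_list.filter
        (fun f => pvType f == "text" && !(PySem.Str.startswith (pvName f) "_"))).map (fun f => pvName f)
    if type_text_fields ≠ [] then type_text_fields.take 2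
    else
      ((final_fields_list.filter
        (fun f => pvType f == "keyword" && !(PySem.Str.startswith (pvName f) "_"))).map (fun f => pvName f)).take 2

-- ===== PORT B =====
-- B's ranked-candidate comprehension: (0, name) for text fields, (1, name) for keyword fields
def pvRanked (l : List (List (String × String))) : List (Int × String) :=
  (l.filter
      (fun f => (pvType f == "text" || pvType f == "keyword") && !(PySem.Str.startswith (pvName f) "_"))).map
    (fun f => ((if pvType f == "text" then (0 : Int) else 1), pvName f))

def get_text_fields_py_alt (final_fields_list : List (List (String × String))) : List String :=
  if final_fields_list.any (fun f => pvName f == "log") then ["log"]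
  else
    let ranked := pvRanked final_fields_list
    if ranked = [] then []
    else
      match PySem.List.min? (ranked.map Prod.fst) (fun x => x) with
      | none => []  -- unreachable: ranked ≠ [] (Python's min on a nonempty generator)
      | some best => ((ranked.filter (fun p => p.1 == best)).map Prod.snd).take 2

-- ===== PRECONDITION & SPEC =====
-- Pre_ excludes exactly the inputs where Python A raises KeyError: a field dict without
-- "field_name", or (when no field is named "log") a field dict without "field_type".
def Pre_get_text_fields_py (final_fields_list : List (List (String × String))) : Prop :=
  (∀ f ∈ final_fields_list, ((PySem.Dict.mk f).get? "field_name").isSome) ∧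
  ((final_fields_list.map (fun f => pvName f)).contains "log" = true ∨
    ∀ f ∈ final_fields_list, ((PySem.Dict.mk f).get? "field_type").isSome)
instance (final_fields_list : List (List (String × String))) : Decidable (Pre_get_text_fields_py final_fields_list) := by unfold Pre_get_text_fields_py; infer_instance

def pvWitness_get_text_fields_py : (List (List (String × String))) :=
  [[("field_name", "a"), ("field_type", "text")], [("field_name", "_b"), ("field_type", "keyword")]]

def Spec_get_text_fields_py (final_fields_list : List (List (String × String))) (out : List String) : Prop := out = get_text_fields_py_alt final_fields_list
instance (final_fields_list : List (List (String × String))) (out : List String) : Decidable (Spec_get_text_fields_py final_fields_list out) := by unfold Spec_get_text_fields_py; infer_instance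

-- ===== CLAIM (what is proved, stated in full; the proofs are below) =====
def Claim_equal_get_text_fields_py : Prop := ∀ (final_fields_list : List (List (String × String))), Dom_get_text_fields_py final_fields_list → Pre_get_text_fields_py final_fields_list → Spec_get_text_fields_py final_fields_list (get_text_fields_py final_fields_list)

-- ===== LEMMAS AND PROOFS =====

-- A's two filtered name lists, as abbreviations for the lemmas
def pvTextL (l : List (List (String × String))) : List String :=
  (l.filter (fun f => pvType f == "text" && !(PySem.Str.startswith (pvName f) "_"))).map (fun f => pvName f)
def pvKwL (l : List (List (String × String))) : List String :=
  (l.filter (fun f => pvType f == "keyword" && !(PySem.Str.startswith (pvName f) "_"))).map (fun f => pvName f)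

theorem pv_rank0 (l : List (List (String × String))) :
    ((pvRanked l).filter (fun p => p.1 == (0 : Int))).map Prod.snd = pvTextL l := by
  induction l with
  | nil => rfl
  | cons f t ih =>
    simp only [pvRanked, pvTextL, List.filter_cons] at *
    by_cases hs : PySem.Chars.startswith (pvName f).toList ['_'] = true
    · simpa [hs] using ih
    · by_cases ht : pvType f = "text"
      · simpa [hs, ht] using ih
      · by_cases hk : pvType f = "keyword"
        · simpa [hs, ht, hk] using ih
        · simpa [hs, ht, hk] using ih

theorem pv_rank1 (l : List (List (String × String))) :
    ((pvRanked l).filter (fun p => p.1 == (1 : Int))).map Prod.snd = pvKwL l := by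
  induction l with
  | nil => rfl
  | cons f t ih =>
    simp only [pvRanked, pvKwL, List.filter_cons] at *
    by_cases hs : PySem.Chars.startswith (pvName f).toList ['_'] = true
    · simpa [hs] using ih
    · by_cases ht : pvType f = "text"
      · simpa [hs, ht] using ih
      · by_cases hk : pvType f = "keyword"
        · simpa [hs, ht, hk] using ih
        · simpa [hs, ht, hk] using ih

theorem pv_ranked_nil (l : List (List (String × String))) :
    pvRanked l = [] ↔ pvTextL l = [] ∧ pvKwL l = [] := by
  induction l with
  | nil => simp [pvRanked, pvTextL, pvKwL]
  | cons f t ih =>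
    simp only [pvRanked, pvTextL, pvKwL, List.filter_cons] at *
    by_cases hs : PySem.Chars.startswith (pvName f).toList ['_'] = true
    · simpa [hs] using ih
    · by_cases ht : pvType f = "text"
      · simp [hs, ht]
      · by_cases hk : pvType f = "keyword"
        · simp [hs, hk]
        · simpa [hs, ht, hk] using ih

theorem pv_rank01 (l : List (List (String × String))) :
    ∀ p ∈ pvRanked l, p.1 = 0 ∨ p.1 = 1 := by
  intro p hp
  simp only [pvRanked, List.mem_map] at hp
  obtain ⟨f, _, rfl⟩ := hp
  by_cases ht : pvType f = "text" <;> simp [ht]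

theorem pv_min01 (xs : List Int) (h : ∀ x ∈ xs, x = 0 ∨ x = 1) (hne : xs ≠ []) :
    PySem.List.min? xs (fun x => x) = some (if (0 : Int) ∈ xs then 0 else 1) := by
  obtain ⟨m, hm⟩ : ∃ m, PySem.List.min? xs (fun x => x) = some m := by
    cases hmin : PySem.List.min? xs (fun x => x) with
    | none => exact absurd ((PySem.List.min?_eq_none_iff xs (fun x => x)).mp hmin) hne
    | some m => exact ⟨m, rfl⟩
  have hmem := PySem.List.min?_mem hm
  have hle := PySem.List.min?_isMin hm
  rw [hm]
  by_cases h0 : (0 : Int) ∈ xs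
  · have := hle 0 h0
    rcases h m hmem with rfl | rfl
    · simp [h0]
    · omega
  · rcases h m hmem with rfl | rfl
    · exact absurd hmem h0
    · simp [h0]

theorem pv_zero_mem_ranks (l : List (List (String × String))) :
    (0 : Int) ∈ (pvRanked l).map Prod.fst ↔ pvTextL l ≠ [] := by
  rw [← pv_rank0]
  constructor
  · intro h hnil
    simp only [List.mem_map] at h
    obtain ⟨p, hp, h0⟩ := h
    rw [List.map_eq_nil_iff, List.filter_eq_nil_iff] at hnil
    exact hnil p hp (by simp [h0])
  · intro hne
    obtain ⟨x, hx⟩ := List.exists_mem_of_ne_nil _ hne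
    simp only [List.mem_map, List.mem_filter] at hx
    obtain ⟨p, ⟨hp, hb⟩, _⟩ := hx
    simp only [List.mem_map]
    exact ⟨p, hp, by simpa using hb⟩

theorem pv_haslog (l : List (List (String × String))) :
    ((l.map (fun f => pvName f)).contains "log") = l.any (fun f => pvName f == "log") := by
  induction l with
  | nil => rfl
  | cons f t ih => rw [List.map_cons, List.contains_cons, List.any_cons, ih, BEq.comm]

theorem pv_ranks01 (l : List (List (String × String))) :
    ∀ x ∈ (pvRanked l).map Prod.fst, x = 0 ∨ x = 1 := by
  intro x hx
  simp only [List.mem_map] at hx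
  obtain ⟨p, hp, rfl⟩ := hx
  exact pv_rank01 l p hp

-- ===== VERDICT (by name: the statement is the Claim_ definition above) =====
theorem get_text_fields_py_spec : Claim_equal_get_text_fields_py := by
  intro l _ _
  unfold Spec_get_text_fields_py get_text_fields_py get_text_fields_py_alt
  simp only [pv_haslog]
  by_cases hlog : l.any (fun f => pvName f == "log") = true
  · rw [if_pos hlog, if_pos hlog]
  · rw [if_neg hlog, if_neg hlog]
    have h0 := pv_rank0 l
    have h1 := pv_rank1 l
    have hnil := pv_ranked_nil l
    have hz := pv_zero_mem_ranks l
    unfold pvTextL at h0 hnil hz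
    unfold pvKwL at h1 hnil
    by_cases hT : (l.filter (fun f => pvType f == "text" && !(PySem.Str.startswith (pvName f) "_"))).map (fun f => pvName f) = []
    · rw [if_neg (by simpa using hT)]
      by_cases hR : pvRanked l = []
      · rw [if_pos hR, (hnil.mp hR).2]; rfl
      · rw [if_neg hR]
        have h0mem : (0 : Int) ∉ (pvRanked l).map Prod.fst := by rw [hz]; simpa using hT
        have hne : (pvRanked l).map Prod.fst ≠ [] := by simpa using hR
        have hmin := pv_min01 ((pvRanked l).map Prod.fst) (pv_ranks01 l) hne
        rw [if_neg h0mem] at hmin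
        rw [hmin, ← h1]
    · rw [if_pos (by simpa using hT)]
      by_cases hR : pvRanked l = []
      · exact absurd ((hnil.mp hR).1) hT
      · rw [if_neg hR]
        have h0mem : (0 : Int) ∈ (pvRanked l).map Prod.fst := by rw [hz]; simpa using hT
        have hne : (pvRanked l).map Prod.fst ≠ [] := by simpa using hR
        have hmin := pv_min01 ((pvRanked l).map Prod.fst) (pv_ranks01 l) hne
        rw [if_pos h0mem] at hmin
        rw [hmin, ← h0]
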